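-- pv_equiv track=rewrite | github.com/pypi-data/pypi-mirror-390 | packages/fts-mcp/fts_mcp-0.0.7-py3-none-any.whl/full_text_search/ingest/ingest_markdown.py | _split_on_indent
-- ===== SOURCE A (Python) =====
-- from typing import List, Literal, Pattern, Tuple
--
-- def _split_on_indent(
--     lines: List[str], bullets: List[Tuple[int, int]], max_chars: int
-- ) -> List[str]:
--     """
--     Recursively cut on bullet lines.  'bullets' holds (line, indent) pairs
--     for *this* slice only (not for the whole doc).
--     """
--     if not bullets:
--         return ["\n".join(lines).rstrip()]
--
--     min_indent = min(ind for _, ind in bullets)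
--     starts = [ln for ln, ind in bullets if ind == min_indent]
--
--     chunks = []
--     for i, s in enumerate(starts):
--         e = starts[i + 1] if i + 1 < len(starts) else len(lines)
--         block = lines[s:e]
--         text = "\n".join(block).rstrip()
--
--         if len(text) > max_chars:
--             # bullets strictly *inside* this slice
--             sub_bullets = [
--                 (ln - s, ind) for ln, ind in bullets if s < ln < e and ind > min_indent
--             ]
--             if sub_bullets:
--                 chunks.extend(_split_on_indent(block, sub_bullets, max_chars))
--                 continue
--         chunks.append(text)
--     return chunks
-- ===== SOURCE B (Python) =====
-- from typing import List, Tuple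
--
--
-- def _split_on_indent(
--     lines: List[str], bullets: List[Tuple[int, int]], max_chars: int
-- ) -> List[str]:
--     """Iterative pre-order DFS over a worklist of tagged items.
--
--     Each worklist entry is either ("text", t) -- a finished chunk awaiting
--     emission -- or ("job", block, bullets) -- a slice still to be analysed.
--     Block boundaries come from zipping starts with its shifted copy instead
--     of indexing, and finished blocks are turned into text items immediately.
--     """
--     out: List[str] = []
--     todo = [("job", lines, bullets)]
--     while todo:
--         item = todo.pop()
--         if item[0] == "text":
--             out.append(item[1])
--             continue
--         _, cur_lines, cur_bullets = item
--         if not cur_bullets: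
--             out.append("\n".join(cur_lines).rstrip())
--             continue
--         lo = min(ind for _, ind in cur_bullets)
--         starts = [ln for ln, ind in cur_bullets if ind == lo]
--         ends = starts[1:] + [len(cur_lines)]
--         pending = []
--         for s, e in zip(starts, ends):
--             block = cur_lines[s:e]
--             text = "\n".join(block).rstrip()
--             sub = (
--                 [(ln - s, ind) for ln, ind in cur_bullets if s < ln < e and ind > lo]
--                 if len(text) > max_chars
--                 else []
--             )
--             pending.append(("job", block, sub) if sub else ("text", text))
--         todo.extend(reversed(pending))
--     return out
-- ===== Notes on version B (the rewrite author's own statement) =====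
-- stated objective: alternative
-- what changed: Replaced A's recursion with an iterative pre-order DFS over an explicit worklist of tagged items (a finished text chunk awaiting emission, or a pending (block, sub-bullets) job), with block boundaries obtained by zipping starts with its shifted copy instead of index arithmetic and finished blocks converted to text items immediately.
import Mathlib
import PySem

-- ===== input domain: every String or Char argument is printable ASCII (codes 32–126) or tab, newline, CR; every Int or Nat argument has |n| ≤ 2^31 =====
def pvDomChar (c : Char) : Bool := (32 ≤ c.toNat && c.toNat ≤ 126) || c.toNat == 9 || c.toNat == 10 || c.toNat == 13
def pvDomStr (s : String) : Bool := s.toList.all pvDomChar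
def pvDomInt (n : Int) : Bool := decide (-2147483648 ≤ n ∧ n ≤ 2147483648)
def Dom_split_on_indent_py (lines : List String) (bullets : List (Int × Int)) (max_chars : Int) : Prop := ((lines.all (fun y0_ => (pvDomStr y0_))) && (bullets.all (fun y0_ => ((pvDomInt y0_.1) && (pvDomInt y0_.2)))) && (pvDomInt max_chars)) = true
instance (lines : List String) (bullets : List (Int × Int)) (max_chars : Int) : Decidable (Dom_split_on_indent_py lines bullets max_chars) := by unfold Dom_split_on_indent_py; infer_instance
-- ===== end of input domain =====

-- B replaces A's recursion by an iterative DFS over a worklist of tagged items (finished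
-- text vs. pending job), with zip-derived block boundaries (objective: alternative
-- decomposition, same asymptotic cost); return values agree everywhere.

-- ===== PORT A =====
-- A recurses with strictly fewer bullets at each call (sub_bullets lacks every
-- minimal-indent bullet), so fuel = bullets.length + 1 is a pure totality guard.
def pvAgo : Nat → List String → List (Int × Int) → Int → List String
  | 0, _, _, _ => []
  | f + 1, lines, bullets, max_chars =>
    if bullets.isEmpty then [PySem.Str.rstrip (PySem.Str.join "\n" lines)]
    else
      let min_indent : Int := (PySem.List.min? (bullets.map (fun p => p.2)) (fun x => x)).getD 0
      let starts : List Int := (bullets.filter (fun p => p.2 == min_indent)).map (fun p => p.1)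
      (PySem.List.enumerate starts 0).foldl (fun chunks p =>
        let i := p.1
        let s := p.2
        let e : Int := if i + 1 < (starts.length : Int) then PySem.List.pyGetD starts (i + 1) 0 else (lines.length : Int)
        let block := PySem.List.slice lines (some s) (some e)
        let text := PySem.Str.rstrip (PySem.Str.join "\n" block)
        if PySem.Str.len text > max_chars then
          let sub := (bullets.filter (fun q => s < q.1 && q.1 < e && min_indent < q.2)).map (fun q => (q.1 - s, q.2))
          if !sub.isEmpty then chunks ++ pvAgo f block sub max_chars
          else chunks ++ [text]
        else chunks ++ [text]) []

def split_on_indent_py (lines : List String) (bullets : List (Int × Int)) (max_chars : Int) : List String :=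
  pvAgo (bullets.length + 1) lines bullets max_chars

-- ===== PORT B =====
-- A worklist entry: either a finished chunk awaiting emission, or a slice still to analyse.
inductive pvW : Type
  | text : String → pvW
  | job : List String → List (Int × Int) → pvW
deriving DecidableEq, Repr

-- Worklist loop: the Lean list models B's Python `todo` stack with its head = the stack
-- top (Python pushes with extend(reversed(pending)) and pops from the end, i.e. takes
-- pending[0] first); `out` is B's output accumulator.  One pop consumes one unit of
-- fuel; the fuel 2 ^ bullets.length bounds the total number of pops (a totality guard).
def pvBloop : Nat → List pvW → Int → List String → List String
  | 0, _, _, out => out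
  | _ + 1, [], _, out => out
  | f + 1, pvW.text t :: rest, mc, out => pvBloop f rest mc (out ++ [t])
  | f + 1, pvW.job curLines curBullets :: rest, mc, out =>
    if curBullets.isEmpty then
      pvBloop f rest mc (out ++ [PySem.Str.rstrip (PySem.Str.join "\n" curLines)])
    else
      let lo : Int := (PySem.List.min? (curBullets.map (fun p => p.2)) (fun x => x)).getD 0
      let starts : List Int := (curBullets.filter (fun p => p.2 == lo)).map (fun p => p.1)
      let ends : List Int := PySem.List.slice starts (some 1) none ++ [(curLines.length : Int)]
      let pending : List pvW := (starts.zip ends).map (fun se =>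
        let block := PySem.List.slice curLines (some se.1) (some se.2)
        let text := PySem.Str.rstrip (PySem.Str.join "\n" block)
        let sub : List (Int × Int) :=
          if PySem.Str.len text > mc then
            (curBullets.filter (fun q => se.1 < q.1 && q.1 < se.2 && lo < q.2)).map (fun q => (q.1 - se.1, q.2))
          else []
        if sub.isEmpty then pvW.text text else pvW.job block sub)
      pvBloop f (pending ++ rest) mc out

def split_on_indent_py_alt (lines : List String) (bullets : List (Int × Int)) (max_chars : Int) : List String :=
  pvBloop (2 ^ bullets.length) [pvW.job lines bullets] max_chars []

-- ===== PRECONDITION & SPEC =====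
def Spec_split_on_indent_py (lines : List String) (bullets : List (Int × Int)) (max_chars : Int) (out : List String) : Prop := out = split_on_indent_py_alt lines bullets max_chars
instance (lines : List String) (bullets : List (Int × Int)) (max_chars : Int) (out : List String) : Decidable (Spec_split_on_indent_py lines bullets max_chars out) := by unfold Spec_split_on_indent_py; infer_instance

-- ===== CLAIM (what is proved, stated in full; the proofs are below) =====
def Claim_equal_split_on_indent_py : Prop := ∀ (lines : List String) (bullets : List (Int × Int)) (max_chars : Int), Dom_split_on_indent_py lines bullets max_chars → Spec_split_on_indent_py lines bullets max_chars (split_on_indent_py lines bullets max_chars)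

-- ===== LEMMAS AND PROOFS =====

/-- The minimal indent of a non-empty bullet list, as both ports compute it. -/
def pvMinInd (bullets : List (Int × Int)) : Int :=
  (PySem.List.min? (bullets.map (fun p => p.2)) (fun x => x)).getD 0

/-- The minimal-indent start lines, as both ports compute them. -/
def pvStarts (bullets : List (Int × Int)) : List Int :=
  (bullets.filter (fun p => p.2 == pvMinInd bullets)).map (fun p => p.1)

/-- The (start, end) boundary pairs of one splitting step, in B's zip form. -/
def pvBounds (lines : List String) (bullets : List (Int × Int)) : List (Int × Int) :=
  (pvStarts bullets).zip (PySem.List.slice (pvStarts bullets) (some 1) none ++ [(lines.length : Int)])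

/-- Block and (conditional) re-based sub-bullets of one boundary pair. -/
def pvBlockSub (lines : List String) (bullets : List (Int × Int)) (mc : Int) (se : Int × Int) :
    List String × List (Int × Int) :=
  let block := PySem.List.slice lines (some se.1) (some se.2)
  let sub : List (Int × Int) :=
    if PySem.Str.len (PySem.Str.rstrip (PySem.Str.join "\n" block)) > mc then
      (bullets.filter (fun q => se.1 < q.1 && q.1 < se.2 && pvMinInd bullets < q.2)).map (fun q => (q.1 - se.1, q.2))
    else []
  (block, sub)

/-- The worklist item B builds for one boundary pair. -/
def pvWF (lines : List String) (bullets : List (Int × Int)) (mc : Int) (se : Int × Int) : pvW :=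
  if (pvBlockSub lines bullets mc se).2.isEmpty then
    pvW.text (PySem.Str.rstrip (PySem.Str.join "\n" (pvBlockSub lines bullets mc se).1))
  else pvW.job (pvBlockSub lines bullets mc se).1 (pvBlockSub lines bullets mc se).2

/-- Meaning of a worklist item: the chunks it will eventually emit. -/
def pvEval (mc : Int) : pvW → List String
  | pvW.text t => [t]
  | pvW.job l b => split_on_indent_py l b mc

lemma pv_foldl_append_of_pointwise {A G : Type} (l : List A) (body : List G → A → List G)
    (g : A → List G) (acc : List G) (hpt : ∀ (acc' : List G), ∀ x ∈ l, body acc' x = acc' ++ g x) :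
    l.foldl body acc = acc ++ l.flatMap g := by
  rw [PySem.List.foldl_congr_mem l body (fun acc' x => acc' ++ g x) acc hpt,
      PySem.List.foldl_append_eq_flatMap]

lemma pvMinInd_attained (bullets : List (Int × Int)) (hne : bullets ≠ []) :
    ∃ q ∈ bullets, q.2 = pvMinInd bullets := by
  cases h : PySem.List.min? (bullets.map (fun p => p.2)) (fun x => x) with
  | none =>
    rw [PySem.List.min?_eq_none_iff] at h
    exact absurd (List.map_eq_nil_iff.mp h) hne
  | some m =>
    obtain ⟨q, hq, hq2⟩ := List.mem_map.mp (PySem.List.min?_mem h)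
    exact ⟨q, hq, by simp [pvMinInd, h, hq2]⟩

lemma pv_sub_lt (bullets : List (Int × Int)) (hne : bullets ≠ []) (s e : Int) :
    ((bullets.filter (fun q => s < q.1 && q.1 < e && pvMinInd bullets < q.2)).map
        (fun q => (q.1 - s, q.2))).length < bullets.length := by
  rw [List.length_map]
  apply List.length_filter_lt_length_iff_exists.mpr
  obtain ⟨q, hq, hq2⟩ := pvMinInd_attained bullets hne
  refine ⟨q, hq, ?_⟩
  simp [hq2]

lemma pv_sub_le (bullets : List (Int × Int)) (s e : Int) :
    ((bullets.filter (fun q => s < q.1 && q.1 < e && pvMinInd bullets < q.2)).map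
        (fun q => (q.1 - s, q.2))).length ≤ bullets.length - (pvStarts bullets).length := by
  rw [List.length_map]
  have hmono : (bullets.filter (fun q => s < q.1 && q.1 < e && pvMinInd bullets < q.2)).length
      ≤ (bullets.filter (fun q => pvMinInd bullets < q.2)).length := by
    rw [← List.countP_eq_length_filter, ← List.countP_eq_length_filter]
    apply List.countP_mono_left
    intro x _ hx
    simp only [Bool.and_eq_true, decide_eq_true_eq] at hx
    simp [hx.2]
  have hlen := List.length_eq_countP_add_countP (fun p : Int × Int => p.2 == pvMinInd bullets) (l := bullets)
  have h2 : (bullets.filter (fun q => pvMinInd bullets < q.2)).length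
      ≤ List.countP (fun a : Int × Int => decide ¬(a.2 == pvMinInd bullets) = true) bullets := by
    rw [← List.countP_eq_length_filter]
    apply List.countP_mono_left
    intro x _ hx
    simp only [decide_eq_true_eq] at hx ⊢
    simp only [beq_iff_eq]
    omega
  have h3 : (pvStarts bullets).length
      = List.countP (fun p : Int × Int => p.2 == pvMinInd bullets) bullets := by
    rw [pvStarts, List.length_map, ← List.countP_eq_length_filter]
  omega

lemma pvAgo_irrel (L : Nat) :
    ∀ (lines : List String) (bullets : List (Int × Int)) (mc : Int) (f g : Nat),
      bullets.length ≤ L → bullets.length < f → bullets.length < g →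
      pvAgo f lines bullets mc = pvAgo g lines bullets mc := by
  induction L with
  | zero =>
    intro lines bullets mc f g hL hf hg
    have hb : bullets = [] := List.length_eq_zero_iff.mp (Nat.le_zero.mp hL)
    obtain ⟨f', rfl⟩ : ∃ f', f = f' + 1 := ⟨f - 1, by omega⟩
    obtain ⟨g', rfl⟩ : ∃ g', g = g' + 1 := ⟨g - 1, by omega⟩
    simp [pvAgo, hb]
  | succ L ih =>
    intro lines bullets mc f g hL hf hg
    obtain ⟨f', rfl⟩ : ∃ f', f = f' + 1 := ⟨f - 1, by omega⟩
    obtain ⟨g', rfl⟩ : ∃ g', g = g' + 1 := ⟨g - 1, by omega⟩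
    by_cases hb : bullets = []
    · simp [pvAgo, hb]
    · have hbe : bullets.isEmpty = false := by cases bullets with | nil => exact absurd rfl hb | cons x t => rfl
      simp only [pvAgo, hbe, Bool.false_eq_true, if_false]
      apply PySem.List.foldl_congr_mem
      intro acc p _
      dsimp only
      split_ifs <;> first
        | rfl
        | (congr 1
           apply ih
           · exact Nat.lt_succ_iff.mp (Nat.lt_of_lt_of_le (pv_sub_lt bullets hb p.2 _) hL)
           · exact Nat.lt_of_lt_of_le (pv_sub_lt bullets hb p.2 _) (Nat.lt_succ_iff.mp hf)
           · exact Nat.lt_of_lt_of_le (pv_sub_lt bullets hb p.2 _) (Nat.lt_succ_iff.mp hg))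

/-- One loop-body step of A equals running A itself on the corresponding block/sub pair. -/
lemma pv_body_eq (lines : List String) (bullets : List (Int × Int)) (mc : Int)
    (hne : bullets ≠ []) (s e : Int) (acc : List String) :
    (let block := PySem.List.slice lines (some s) (some e)
     let text := PySem.Str.rstrip (PySem.Str.join "\n" block)
     if PySem.Str.len text > mc then
       let sub := (bullets.filter (fun q => s < q.1 && q.1 < e && pvMinInd bullets < q.2)).map (fun q => (q.1 - s, q.2))
       if !sub.isEmpty then acc ++ pvAgo bullets.length (PySem.List.slice lines (some s) (some e)) sub mc
       else acc ++ [text]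
     else acc ++ [text])
    = acc ++ split_on_indent_py (pvBlockSub lines bullets mc (s, e)).1 (pvBlockSub lines bullets mc (s, e)).2 mc := by
  simp only [pvBlockSub]
  split_ifs with h1 h2
  · congr 1
    rw [split_on_indent_py]
    have hlt := pv_sub_lt bullets hne s e
    apply pvAgo_irrel bullets.length <;> omega
  · have h2' : ((bullets.filter (fun q => s < q.1 && q.1 < e && pvMinInd bullets < q.2)).map
        (fun q => (q.1 - s, q.2))) = [] := by simpa using h2
    rw [h2']
    simp [split_on_indent_py, pvAgo]
  · simp [split_on_indent_py, pvAgo]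

/-- B's zip-derived boundary pairs, re-expressed through A's enumerate/index form. -/
lemma pv_zip_enum (xs : List Int) (L : Int) :
    xs.zip (PySem.List.slice xs (some 1) none ++ [L])
      = (PySem.List.enumerate xs 0).map
          (fun p => (p.2, if p.1 + 1 < (xs.length : Int) then PySem.List.pyGetD xs (p.1 + 1) 0 else L)) := by
  rw [PySem.List.slice_from_one]
  apply List.ext_getElem
  · simp [PySem.List.length_enumerate]
    cases xs <;> simp
  · intro i h1 h2
    have hn : i < xs.length := by
      simp [PySem.List.length_enumerate] at h2; exact h2
    have hget : (PySem.List.enumerate xs 0)[i]'(by simpa [PySem.List.length_enumerate] using hn)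
        = ((0 : Int) + i, xs[i]) :=
      PySem.List.getElem_enumerate xs 0 i (by simpa [PySem.List.length_enumerate] using hn)
    simp only [List.getElem_zip, List.getElem_map, hget]
    have hz : (0 : Int) + (i : Int) = (i : Int) := by ring
    rw [hz]
    by_cases hlast : i + 1 < xs.length
    · have hc : ((i : Int) + 1 < (xs.length : Int)) := by exact_mod_cast hlast
      have hcast : (i : Int) + 1 = ((i + 1 : Nat) : Int) := by push_cast; ring
      rw [if_pos hc, hcast, PySem.List.pyGetD_natCast]
      have htl : i < xs.tail.length := by simp [List.length_tail]; omega
      rw [List.getElem_append_left (by simpa using htl)]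
      simp [List.getElem_tail, List.getD_eq_getElem?_getD, List.getElem?_eq_getElem hlast]
    · have hc : ¬ ((i : Int) + 1 < (xs.length : Int)) := by
        intro hcc; exact hlast (by exact_mod_cast hcc)
      rw [if_neg hc]
      have hil : i = xs.tail.length := by simp [List.length_tail]; omega
      rw [List.getElem_append_right (by omega)]
      simp [hil]

/-- A's result is the concatenation of its children's results, over B's boundary pairs. -/
lemma pvA_flat (lines : List String) (bullets : List (Int × Int)) (mc : Int)
    (hne : bullets ≠ []) :
    split_on_indent_py lines bullets mc =
      (pvBounds lines bullets).flatMap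
        (fun se => split_on_indent_py (pvBlockSub lines bullets mc se).1 (pvBlockSub lines bullets mc se).2 mc) := by
  have hbe : bullets.isEmpty = false := by cases bullets with | nil => exact absurd rfl hne | cons x t => rfl
  conv_lhs => simp only [split_on_indent_py, pvAgo, hbe, Bool.false_eq_true, if_false]
  refine (pv_foldl_append_of_pointwise _ _
      (fun p => split_on_indent_py
        (pvBlockSub lines bullets mc (p.2, if p.1 + 1 < ((pvStarts bullets).length : Int) then PySem.List.pyGetD (pvStarts bullets) (p.1 + 1) 0 else (lines.length : Int))).1
        (pvBlockSub lines bullets mc (p.2, if p.1 + 1 < ((pvStarts bullets).length : Int) then PySem.List.pyGetD (pvStarts bullets) (p.1 + 1) 0 else (lines.length : Int))).2 mc) [] ?_).trans ?_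
  · intro acc p _
    have := pv_body_eq lines bullets mc hne p.2
      (if p.1 + 1 < ((pvStarts bullets).length : Int) then PySem.List.pyGetD (pvStarts bullets) (p.1 + 1) 0 else (lines.length : Int)) acc
    simpa only [pvStarts, pvMinInd] using this
  · rw [pvBounds, pv_zip_enum (pvStarts bullets) (lines.length : Int), List.flatMap_map]
    simp only [pvStarts, pvMinInd, List.nil_append]

/-- Each worklist item evaluates to A's result on its block/sub pair. -/
lemma pv_eval_WF (lines : List String) (bullets : List (Int × Int)) (mc : Int) (se : Int × Int) :
    pvEval mc (pvWF lines bullets mc se)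
      = split_on_indent_py (pvBlockSub lines bullets mc se).1 (pvBlockSub lines bullets mc se).2 mc := by
  rw [pvWF]
  split_ifs with h
  · have h' : (pvBlockSub lines bullets mc se).2 = [] := by simpa using h
    rw [h']
    simp [pvEval, split_on_indent_py, pvAgo]
  · rfl

/-- Fuel measure of a worklist: one pop per unit, geometrically weighted by bullet count. -/
def pvM (stack : List pvW) : Nat :=
  (stack.map (fun it => match it with | pvW.text _ => 1 | pvW.job _ b => 2 ^ b.length)).sum

lemma pv_pending_measure (lines : List String) (bullets : List (Int × Int)) (mc : Int)
    (hne : bullets ≠ []) :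
    pvM ((pvBounds lines bullets).map (pvWF lines bullets mc)) + 1 ≤ 2 ^ bullets.length := by
  have hk1 : 1 ≤ (pvStarts bullets).length := by
    obtain ⟨q, hq, hq2⟩ := pvMinInd_attained bullets hne
    have hmem : q ∈ bullets.filter (fun p => p.2 == pvMinInd bullets) :=
      List.mem_filter.mpr ⟨hq, by simp [hq2]⟩
    rw [pvStarts, List.length_map]
    exact List.length_pos_of_mem hmem
  have hkL : (pvStarts bullets).length ≤ bullets.length := by
    rw [pvStarts, List.length_map]
    exact List.length_filter_le _ bullets
  have hterm : ∀ x ∈ ((pvBounds lines bullets).map (pvWF lines bullets mc)).map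
      (fun it => match it with | pvW.text _ => 1 | pvW.job _ b => 2 ^ b.length),
      x ≤ 2 ^ (bullets.length - (pvStarts bullets).length) := by
    intro x hx
    obtain ⟨it, hit, rfl⟩ := List.mem_map.mp hx
    obtain ⟨se, _, rfl⟩ := List.mem_map.mp hit
    rw [pvWF]
    split_ifs with h
    · exact Nat.one_le_two_pow
    · have hsub : ((pvBlockSub lines bullets mc se).2).length
          ≤ bullets.length - (pvStarts bullets).length := by
        rw [pvBlockSub]
        dsimp only
        split_ifs
        · exact pv_sub_le bullets se.1 se.2
        · simp
      exact Nat.pow_le_pow_right (by omega) hsub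
  have hsum := List.sum_le_card_nsmul _ _ hterm
  have hlenB : (pvBounds lines bullets).length = (pvStarts bullets).length := by
    rw [pvBounds, PySem.List.slice_from_one, List.length_zip]
    cases h : pvStarts bullets with
    | nil => simp [h] at hk1
    | cons a t => simp
  have hlen : (((pvBounds lines bullets).map (pvWF lines bullets mc)).map
      (fun it => match it with | pvW.text _ => 1 | pvW.job _ b => 2 ^ b.length)).length
      = (pvStarts bullets).length := by
    simp [hlenB]
  rw [hlen, smul_eq_mul] at hsum
  have hk2 : (pvStarts bullets).length ≤ 2 ^ ((pvStarts bullets).length - 1) := by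
    have := @Nat.lt_two_pow_self ((pvStarts bullets).length - 1)
    omega
  have hmul : (pvStarts bullets).length * 2 ^ (bullets.length - (pvStarts bullets).length)
      ≤ 2 ^ (bullets.length - 1) := by
    calc (pvStarts bullets).length * 2 ^ (bullets.length - (pvStarts bullets).length)
        ≤ 2 ^ ((pvStarts bullets).length - 1) * 2 ^ (bullets.length - (pvStarts bullets).length) :=
          Nat.mul_le_mul_right _ hk2
      _ = 2 ^ ((pvStarts bullets).length - 1 + (bullets.length - (pvStarts bullets).length)) := by
          rw [pow_add]
      _ = 2 ^ (bullets.length - 1) := by congr 1; omega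
  have hfin : 2 ^ (bullets.length - 1) + 1 ≤ 2 ^ bullets.length := by
    have h1 : 1 ≤ bullets.length := by omega
    have h2 : 2 ^ bullets.length = 2 ^ (bullets.length - 1) * 2 := by
      rw [← pow_succ]; congr 1; omega
    have hpos : 1 ≤ 2 ^ (bullets.length - 1) := Nat.one_le_two_pow
    omega
  have hfinal : pvM ((pvBounds lines bullets).map (pvWF lines bullets mc))
      ≤ 2 ^ (bullets.length - 1) := le_trans hsum hmul
  omega

/-- B's job step pushes exactly the mapped boundary items. -/
lemma pvBloop_job_ne (f : Nat) (l : List String) (b : List (Int × Int))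
    (rest : List pvW) (mc : Int) (out : List String) (hb : b ≠ []) :
    pvBloop (f + 1) (pvW.job l b :: rest) mc out
      = pvBloop f ((pvBounds l b).map (pvWF l b mc) ++ rest) mc out := by
  have hbe : b.isEmpty = false := by cases b with | nil => exact absurd rfl hb | cons x t => rfl
  simp only [pvBloop, hbe, Bool.false_eq_true, if_false]
  rfl

/-- Main invariant: with enough fuel, the loop appends every item's evaluation in order. -/
lemma pvBloop_step (mc : Int) :
    ∀ (f : Nat) (stack : List pvW) (out : List String),
      pvM stack ≤ f →
      pvBloop f stack mc out = out ++ stack.flatMap (pvEval mc) := by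
  intro f
  induction f using Nat.strong_induction_on with
  | _ f ih =>
    intro stack out h
    match stack with
    | [] => cases f <;> simp [pvBloop]
    | pvW.text t :: rest =>
      have hM : pvM (pvW.text t :: rest) = 1 + pvM rest := by simp [pvM]
      obtain ⟨f', rfl⟩ : ∃ f', f = f' + 1 := ⟨f - 1, by omega⟩
      simp only [pvBloop]
      rw [ih f' (by omega) rest _ (by rw [hM] at h; omega)]
      simp [pvEval]
    | pvW.job l b :: rest =>
      have hpow : 1 ≤ 2 ^ b.length := Nat.one_le_two_pow
      have hM : pvM (pvW.job l b :: rest) = 2 ^ b.length + pvM rest := by simp [pvM]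
      rw [hM] at h
      obtain ⟨f', rfl⟩ : ∃ f', f = f' + 1 := ⟨f - 1, by omega⟩
      by_cases hb : b = []
      · subst hb
        simp only [pvBloop, List.isEmpty_nil, if_true]
        rw [ih f' (by omega) rest _ (by simp [pvM] at h ⊢; omega)]
        simp [pvEval, split_on_indent_py, pvAgo]
      · rw [pvBloop_job_ne f' l b rest mc out hb]
        have hmeas : pvM ((pvBounds l b).map (pvWF l b mc) ++ rest) ≤ f' := by
          have h1 := pv_pending_measure l b mc hb
          have h2 : pvM ((pvBounds l b).map (pvWF l b mc) ++ rest)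
              = pvM ((pvBounds l b).map (pvWF l b mc)) + pvM rest := by simp [pvM]
          omega
        rw [ih f' (by omega) _ _ hmeas, List.flatMap_append, List.flatMap_cons]
        congr 2
        rw [List.flatMap_map]
        simp only [pvEval]
        rw [pvA_flat l b mc hb]
        exact List.flatMap_congr (fun se _ => pv_eval_WF l b mc se)

-- ===== VERDICT (by name: the statement is the Claim_ definition above) =====

theorem split_on_indent_py_spec : Claim_equal_split_on_indent_py := by
  intro lines bullets mc _
  unfold Spec_split_on_indent_py split_on_indent_py_alt
  rw [pvBloop_step mc (2 ^ bullets.length) [pvW.job lines bullets] []]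
  · simp [pvEval]
  · simp [pvM]
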